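-- pv_equiv track=rewrite | github.com/Ianthe23/anul-3 | lftc/lab3/a-doua-parte/lexical_analyzer.py | try_match_string_literal
-- ===== SOURCE A (Python) =====
-- from typing import List, Optional, Tuple
--
-- def try_match_string_literal(
--     text: str, pos: int
-- ) -> Optional[Tuple[str, int]]:
--     """Incearca sa potriveasca un string literal (intre ghilimele)"""
--     if pos >= len(text) or text[pos] != '"':
--         return None
--
--     end_pos = pos + 1
--     while end_pos < len(text):
--         if text[end_pos] == '"':
--             # Am gasit sfarsitul string-ului
--             string_value = text[pos : end_pos + 1]
--             return (string_value, end_pos + 1)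
--         elif text[end_pos] == "\\":
--             # Escape sequence
--             end_pos += 2
--         else:
--             end_pos += 1
--
--     # String neterminat
--     return None
-- ===== SOURCE B (Python) =====
-- from typing import List, Optional, Tuple
--
-- def try_match_string_literal(
--     text: str, pos: int
-- ) -> Optional[Tuple[str, int]]:
--     """Match a double-quoted string literal starting at pos.
--
--     Instead of scanning forward character by character, jump from one
--     candidate closing quote to the next with str.find and accept the first
--     quote preceded by an EVEN run of backslashes (an odd run means the quote
--     is escaped)."""
--     if pos < 0 or pos >= len(text) or text[pos] != '"':
--         return None
--     j = text.find('"', pos + 1)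
--     while j != -1:
--         k = j - 1
--         while k > pos and text[k] == "\\":
--             k -= 1
--         if (j - 1 - k) % 2 == 0:
--             return (text[pos : j + 1], j + 1)
--         j = text.find('"', j + 1)
--     return None
-- ===== Notes on version B (the rewrite author's own statement) =====
-- stated objective: alternative
-- what changed: Replaces A's forward character-by-character state machine (position jumps of +1/+2) by an outer str.find loop over candidate closing quotes, accepting the first quote preceded by an even run of backslashes (backward parity count); restricted to non-negative positions.
-- outside the precondition, e.g. on try_match_string_literal('"a"', -3): A returns ('', 0), B returns None; on try_match_string_literal('', -1): A raises IndexError, B returns None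
import Mathlib
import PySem

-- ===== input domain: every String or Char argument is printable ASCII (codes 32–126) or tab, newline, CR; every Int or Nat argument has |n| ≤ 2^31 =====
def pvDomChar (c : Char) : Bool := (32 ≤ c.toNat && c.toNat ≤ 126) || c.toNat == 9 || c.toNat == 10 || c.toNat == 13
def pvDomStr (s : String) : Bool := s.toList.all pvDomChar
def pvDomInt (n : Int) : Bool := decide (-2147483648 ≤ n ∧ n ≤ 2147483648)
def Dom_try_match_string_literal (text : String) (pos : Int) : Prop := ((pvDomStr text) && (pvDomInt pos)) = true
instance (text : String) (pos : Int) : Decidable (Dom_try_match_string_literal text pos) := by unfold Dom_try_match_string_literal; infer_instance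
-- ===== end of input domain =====

-- B replaces A's forward character-by-character scan by a str.find jump over candidate
-- closing quotes with a backward backslash-parity check; return values proved equal for pos ≥ 0.

-- ===== PORT A =====
-- A's while-loop: end_pos walks by +1, or +2 after a backslash; fuel bounds the iteration count.
def tmslLoopA (text : String) (pos : Int) : Int → Nat → Option (String × Int)
  | _, 0 => none
  | endPos, fuel+1 =>
    if endPos < (text.toList.length : Int) then
      match PySem.Str.pyGet? text endPos with
      | none => none  -- unreachable while end_pos ≥ -len; Python would raise
      | some c =>
        if c = '"' then
          some (PySem.Str.slice text (some pos) (some (endPos + 1)), endPos + 1)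
        else if c = '\\' then tmslLoopA text pos (endPos + 2) fuel
        else tmslLoopA text pos (endPos + 1) fuel
    else none

def try_match_string_literal (text : String) (pos : Int) : Option (String × Int) :=
  if pos ≥ (text.toList.length : Int) then none
  else
    match PySem.Str.pyGet? text pos with
    | none => none  -- Python raises IndexError here (pos < -len); outside Pre_
    | some c =>
      if c ≠ '"' then none
      else tmslLoopA text pos (pos + 1) (text.toList.length + pos.natAbs + 2)

-- ===== PORT B =====
-- Source B's inner while: step k down over backslashes while k > pos.
-- text[k] is only read when pos < k (so 0 ≤ k < len in every call B makes): getD is exact there.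
def tmslBack (l : List Char) (pos : Int) (k : Int) : Int :=
  if h : pos < k ∧ l.getD k.toNat ' ' = '\\' then tmslBack l pos (k - 1) else k
termination_by (k - pos).toNat
decreasing_by omega

-- Source B's outer while over j = text.find('"', …); j strictly increases, so len+1 fuel suffices.
def tmslOuter (text : String) (pos : Int) : Int → Nat → Option (String × Int)
  | _, 0 => none  -- unreachable with the fuel supplied below
  | j, fuel+1 =>
    if j = -1 then none
    else
      let k := tmslBack text.toList pos (j - 1)
      if PySem.Int.mod (j - 1 - k) 2 = 0 then
        some (PySem.Str.slice text (some pos) (some (j + 1)), j + 1)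
      else tmslOuter text pos (PySem.Str.findFrom text "\"" (j + 1)) fuel

def try_match_string_literal_alt (text : String) (pos : Int) : Option (String × Int) :=
  if pos < 0 then none
  else if pos ≥ (text.toList.length : Int) then none
  else
    match PySem.Str.pyGet? text pos with
    | none => none  -- unreachable: 0 ≤ pos < len
    | some c =>
      if c ≠ '"' then none
      else tmslOuter text pos (PySem.Str.findFrom text "\"" (pos + 1)) (text.toList.length + 1)

-- ===== PRECONDITION & SPEC =====
-- Pre_ excludes negative positions — outside a lexer's natural position domain — where A raises
-- IndexError (pos < -len) or returns accidental values via Python's negative-index wraparound.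
def Pre_try_match_string_literal (text : String) (pos : Int) : Prop := 0 ≤ pos
instance (text : String) (pos : Int) : Decidable (Pre_try_match_string_literal text pos) := by unfold Pre_try_match_string_literal; infer_instance
def pvWitness_try_match_string_literal : String × Int := ("\"hi\"", 0)

def Spec_try_match_string_literal (text : String) (pos : Int) (out : Option (String × Int)) : Prop := out = try_match_string_literal_alt text pos
instance (text : String) (pos : Int) (out : Option (String × Int)) : Decidable (Spec_try_match_string_literal text pos out) := by unfold Spec_try_match_string_literal; infer_instance

-- ===== CLAIM (what is proved, stated in full; the proofs are below) =====
def Claim_equal_try_match_string_literal : Prop := ∀ (text : String) (pos : Int), Dom_try_match_string_literal text pos → Pre_try_match_string_literal text pos → Spec_try_match_string_literal text pos (try_match_string_literal text pos)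

-- ===== LEMMAS AND PROOFS =====

lemma tmslLoopA_stop (text : String) (pos e : Int) (fuel : Nat)
    (h : ¬ e < (text.toList.length : Int)) : tmslLoopA text pos e fuel = none := by
  cases fuel
  · simp [tmslLoopA]
  · simp [tmslLoopA]
    intro hlt
    exact absurd (by exact_mod_cast hlt) h

lemma tmslOuter_neg (text : String) (pos : Int) (fuel : Nat) :
    tmslOuter text pos (-1) fuel = none := by
  cases fuel <;> simp [tmslOuter]

lemma tmslBack_stop (l : List Char) (pos k : Int)
    (h : ¬ (pos < k ∧ l.getD k.toNat ' ' = '\\')) : tmslBack l pos k = k := by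
  rw [tmslBack]; exact dif_neg h

lemma tmslBack_step (l : List Char) (pos k : Int)
    (h1 : pos < k) (h2 : l.getD k.toNat ' ' = '\\') :
    tmslBack l pos k = tmslBack l pos (k - 1) := by
  conv_lhs => rw [tmslBack]
  exact dif_pos ⟨h1, h2⟩

lemma go_cons (c : Char) (t : List Char) (k : Nat) :
    PySem.Chars.find.go ['"'] (c :: t) k =
      if c = '"' then (k : Int) else PySem.Chars.find.go ['"'] t (k+1) := by
  rw [PySem.Chars.find.go]
  simp only [List.isPrefixOf, Bool.and_true, beq_iff_eq, eq_comm (a := '"')]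

lemma go_nil (k : Nat) : PySem.Chars.find.go ['"'] [] k = -1 := by
  simp [PySem.Chars.find.go]

lemma go_lb : ∀ (t : List Char) (k : Nat),
    PySem.Chars.find.go ['"'] t k = -1 ∨ (k : Int) ≤ PySem.Chars.find.go ['"'] t k := by
  intro t
  induction t with
  | nil => intro k; left; exact go_nil k
  | cons c t ih =>
    intro k
    rw [go_cons]
    by_cases h : c = '"'
    · right; simp [h]
    · simp only [h, if_false]
      rcases ih (k+1) with h1 | h1
      · left; exact h1
      · right; omega

lemma go_shift : ∀ (t : List Char) (k : Nat),
    PySem.Chars.find.go ['"'] t k =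
      if PySem.Chars.find.go ['"'] t 0 = -1 then -1
      else PySem.Chars.find.go ['"'] t 0 + k := by
  intro t
  induction t with
  | nil => intro k; simp [go_nil]
  | cons c t ih =>
    intro k
    by_cases h : c = '"'
    · simp [go_cons, h]
    · rw [go_cons, go_cons, if_neg h, if_neg h, ih (k+1), ih 1]
      rcases go_lb t 0 with h1 | h1
      · simp [h1]
      · split <;> omega


lemma findQ_end (text : String) (e : Int) (h0 : 0 ≤ e)
    (h : (text.toList.length : Int) ≤ e) :
    PySem.Str.findFrom text "\"" e = -1 := by
  rw [PySem.Str.findFrom_eq]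
  show PySem.Chars.findFrom text.toList ['"'] e none = -1
  rcases eq_or_lt_of_le h with heq | hlt
  · have he : e = ((text.toList.length : Nat) : Int) := heq.symm
    rw [he, PySem.Chars.findFrom_natCast _ _ _ (le_refl _)]
    have hd : List.drop text.length text.toList = [] := by
      apply List.drop_eq_nil_of_le; simp
    simp [PySem.Chars.find, hd, go_nil]
  · unfold PySem.Chars.findFrom
    rw [if_pos]
    simp only [if_neg (not_lt.mpr h0)]
    omega

lemma findQ_hit (text : String) (e : Int) (h0 : 0 ≤ e)
    (hlt : e < (text.toList.length : Int))
    (hq : text.toList.getD e.toNat ' ' = '"') :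
    PySem.Str.findFrom text "\"" e = e := by
  rw [PySem.Str.findFrom_eq]
  show PySem.Chars.findFrom text.toList ['"'] e none = e
  have he : e = ((e.toNat : Nat) : Int) := by omega
  have hk : e.toNat ≤ text.toList.length := by omega
  have hkl : e.toNat < text.toList.length := by omega
  rw [he, PySem.Chars.findFrom_natCast _ _ _ hk]
  have hd : List.drop e.toNat text.toList
      = text.toList[e.toNat] :: List.drop (e.toNat + 1) text.toList :=
    List.drop_eq_getElem_cons hkl
  have hc : text.toList[e.toNat] = '"' := by
    rw [← List.getD_eq_getElem text.toList ' ' hkl]; exact hq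
  rw [hd, hc]
  have hfind0 : PySem.Chars.find ('"' :: List.drop (e.toNat + 1) text.toList) ['"'] = 0 := by
    show PySem.Chars.find.go _ _ 0 = 0
    rw [go_cons]; simp
  rw [hfind0]
  simp

lemma findQ_skip (text : String) (e : Int) (h0 : 0 ≤ e)
    (hlt : e < (text.toList.length : Int))
    (hq : text.toList.getD e.toNat ' ' ≠ '"') :
    PySem.Str.findFrom text "\"" e = PySem.Str.findFrom text "\"" (e + 1) := by
  rw [PySem.Str.findFrom_eq, PySem.Str.findFrom_eq]
  show PySem.Chars.findFrom text.toList ['"'] e none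
      = PySem.Chars.findFrom text.toList ['"'] (e + 1) none
  have he : e = ((e.toNat : Nat) : Int) := by omega
  have he1 : e + 1 = (((e.toNat + 1) : Nat) : Int) := by omega
  have hk : e.toNat ≤ text.toList.length := by omega
  have hkl : e.toNat < text.toList.length := by omega
  have hk1 : e.toNat + 1 ≤ text.toList.length := by omega
  rw [he, show ((e.toNat : Nat) : Int) + 1 = (((e.toNat + 1) : Nat) : Int) by push_cast; ring,
    PySem.Chars.findFrom_natCast _ _ _ hk, PySem.Chars.findFrom_natCast _ _ _ hk1]
  have hd : List.drop e.toNat text.toList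
      = text.toList[e.toNat] :: List.drop (e.toNat + 1) text.toList :=
    List.drop_eq_getElem_cons hkl
  have hc : text.toList[e.toNat] ≠ '"' := by
    rw [List.getD_eq_getElem text.toList ' ' hkl] at hq; exact hq
  rw [hd]
  have hfind : PySem.Chars.find (text.toList[e.toNat] :: List.drop (e.toNat + 1) text.toList) ['"']
      = if PySem.Chars.find (List.drop (e.toNat + 1) text.toList) ['"'] = -1 then -1
        else PySem.Chars.find (List.drop (e.toNat + 1) text.toList) ['"'] + 1 := by
    show PySem.Chars.find.go _ _ 0 = _
    rw [go_cons, if_neg hc, go_shift]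
    rfl
  rw [hfind]
  rcases go_lb (List.drop (e.toNat + 1) text.toList) 0 with h1 | h1
  · have h1' : PySem.Chars.find (List.drop (e.toNat + 1) text.toList) ['"'] = -1 := h1
    simp [h1']
  · have h1' : (0:Int) ≤ PySem.Chars.find (List.drop (e.toNat + 1) text.toList) ['"'] := h1
    split <;> split <;> omega

lemma tmsl_main (text : String) (pos : Int) (hpos : 0 ≤ pos) :
    ∀ (fuelA : Nat) (e : Int) (fuelB : Nat),
      pos + 1 ≤ e → e ≤ (text.toList.length : Int) →
      (text.toList.length : Int) - e < fuelA →
      (text.toList.length : Int) - e < fuelB →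
      (e - 1 - tmslBack text.toList pos (e - 1)) % 2 = 0 →
      tmslLoopA text pos e fuelA = tmslOuter text pos (PySem.Str.findFrom text "\"" e) fuelB := by
  intro fuelA
  induction fuelA with
  | zero => intro e fuelB he hle hfA hfB hpar; omega
  | succ fA ih =>
    intro e fuelB he hle hfA hfB hpar
    by_cases hlt : e < (text.toList.length : Int)
    case neg =>
      rw [tmslLoopA_stop _ _ _ _ hlt, findQ_end text e (by omega) (by omega), tmslOuter_neg]
    case pos =>
      have he0 : 0 ≤ e := by omega
      have heN : e.toNat < text.toList.length := by omega
      have hget : PySem.List.pyGet? text.toList e = some (text.toList[e.toNat]) := by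
        rw [PySem.List.pyGet?_of_nonneg text.toList he0]
        exact List.getElem?_eq_getElem heN
      have hgd : text.toList.getD e.toNat ' ' = text.toList[e.toNat] :=
        List.getD_eq_getElem _ _ heN
      have hlt' : e < ((text.length : Int)) := by simpa using hlt
      have he11 : e + 1 - 1 = e := by ring
      by_cases hq : text.toList[e.toNat] = '"'
      · -- closing quote at e: both sides return the slice
        have hF : PySem.Str.findFrom text "\"" e = e :=
          findQ_hit text e he0 hlt (by rw [hgd]; exact hq)
        have hmod : PySem.Int.mod (e - 1 - tmslBack text.toList pos (e - 1)) 2 = 0 := by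
          rw [PySem.Int.mod_eq_emod_of_pos (by norm_num)]; exact hpar
        cases fuelB with
        | zero => omega
        | succ fb =>
          have hne : ¬ (e = -1) := by omega
          rw [hF]
          simp [tmslLoopA, tmslOuter, hlt', hget, hq, hne]
          intro hcontra
          omega
      · by_cases hb : text.toList[e.toNat] = '\\'
        · -- backslash at e: A jumps to e+2
          have hskip : PySem.Str.findFrom text "\"" e = PySem.Str.findFrom text "\"" (e + 1) :=
            findQ_skip text e he0 hlt (by rw [hgd]; exact hq)
          have hA : tmslLoopA text pos e (fA + 1) = tmslLoopA text pos (e + 2) fA := by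
            simp [tmslLoopA, hlt', hget, hb]
          rw [hA, hskip]
          by_cases h1 : e + 1 < (text.toList.length : Int)
          case neg =>
            rw [tmslLoopA_stop _ _ _ _ (by omega),
              findQ_end text (e + 1) (by omega) (by omega), tmslOuter_neg]
          case pos =>
            have h1N : (e + 1).toNat < text.toList.length := by omega
            have hgd1 : text.toList.getD (e + 1).toNat ' ' = text.toList[(e + 1).toNat] :=
              List.getD_eq_getElem _ _ h1N
            have hback : tmslBack text.toList pos e = tmslBack text.toList pos (e - 1) :=
              tmslBack_step _ _ _ (by omega) (by rw [hgd]; exact hb)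
            by_cases hd : text.toList[(e + 1).toNat] = '"'
            · -- escaped quote at e+1: B's parity check rejects it and finds the next quote
              have hF1 : PySem.Str.findFrom text "\"" (e + 1) = e + 1 :=
                findQ_hit text (e + 1) (by omega) h1 (by rw [hgd1]; exact hd)
              cases fuelB with
              | zero => omega
              | succ fb =>
                have hne : ¬ (e + 1 = -1) := by omega
                have hmodne : ¬ PySem.Int.mod (e + 1 - 1 - tmslBack text.toList pos (e + 1 - 1)) 2 = 0 := by
                  rw [PySem.Int.mod_eq_emod_of_pos (by norm_num), he11, hback]
                  omega
                rw [hF1]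
                have hout : tmslOuter text pos (e + 1) (fb + 1)
                    = tmslOuter text pos (PySem.Str.findFrom text "\"" (e + 1 + 1)) fb := by
                  simp only [tmslOuter, if_neg hne, if_neg hmodne]
                rw [hout]
                have hpar2 : (e + 2 - 1 - tmslBack text.toList pos (e + 2 - 1)) % 2 = 0 := by
                  have hstop : tmslBack text.toList pos (e + 2 - 1) = e + 2 - 1 := by
                    apply tmslBack_stop
                    rintro ⟨-, hch⟩
                    rw [show e + 2 - 1 = e + 1 by ring, hgd1, hd] at hch
                    exact absurd hch (by decide)
                  rw [hstop]; omega
                have := ih (e + 2) fb (by omega) (by omega) (by omega) (by omega) hpar2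
                rw [show e + 1 + 1 = e + 2 by ring]
                exact this
            · -- non-quote at e+1: both skip to e+2 (the backslash run stays even)
              have hskip1 : PySem.Str.findFrom text "\"" (e + 1) = PySem.Str.findFrom text "\"" (e + 2) := by
                have := findQ_skip text (e + 1) (by omega) h1 (by rw [hgd1]; exact hd)
                rw [this, show e + 1 + 1 = e + 2 by ring]
              rw [hskip1]
              apply ih (e + 2) fuelB (by omega) (by omega) (by omega) (by omega)
              by_cases hbs : text.toList[(e + 1).toNat] = '\\'
              · have hstep1 : tmslBack text.toList pos (e + 2 - 1) = tmslBack text.toList pos (e - 1) := by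
                  rw [show e + 2 - 1 = e + 1 by ring,
                    tmslBack_step _ _ _ (by omega) (by rw [hgd1]; exact hbs), he11, hback]
                rw [hstep1]; omega
              · have hstop : tmslBack text.toList pos (e + 2 - 1) = e + 2 - 1 := by
                  apply tmslBack_stop
                  rintro ⟨-, hch⟩
                  rw [show e + 2 - 1 = e + 1 by ring, hgd1] at hch
                  exact hbs hch
                rw [hstop]; omega
        · -- ordinary character: both move to e+1
          have hA : tmslLoopA text pos e (fA + 1) = tmslLoopA text pos (e + 1) fA := by
            simp [tmslLoopA, hlt', hget, hq, hb]
          have hskip : PySem.Str.findFrom text "\"" e = PySem.Str.findFrom text "\"" (e + 1) :=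
            findQ_skip text e he0 hlt (by rw [hgd]; exact hq)
          rw [hA, hskip]
          apply ih (e + 1) fuelB (by omega) (by omega) (by omega) (by omega)
          have hstop : tmslBack text.toList pos (e + 1 - 1) = e + 1 - 1 := by
            apply tmslBack_stop
            rintro ⟨-, hch⟩
            rw [he11, hgd] at hch
            exact hb hch
          rw [hstop]; omega

-- ===== VERDICT (by name: the statement is the Claim_ definition above) =====
theorem try_match_string_literal_spec : Claim_equal_try_match_string_literal := by
  intro text pos _hdom hpre
  unfold Spec_try_match_string_literal
  unfold Pre_try_match_string_literal at hpre
  unfold try_match_string_literal try_match_string_literal_alt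
  by_cases hge : pos ≥ (text.toList.length : Int)
  · have hge' : ((text.length : Int)) ≤ pos := by simpa using hge
    simp [hge', not_lt.mpr hpre]
  · have hlt : pos < (text.toList.length : Int) := by omega
    have hge' : ¬ ((text.length : Int)) ≤ pos := by simpa using hlt
    have heN : pos.toNat < text.toList.length := by omega
    have hget : PySem.List.pyGet? text.toList pos = some (text.toList[pos.toNat]) := by
      rw [PySem.List.pyGet?_of_nonneg text.toList hpre]
      exact List.getElem?_eq_getElem heN
    by_cases hq : text.toList[pos.toNat] = '"'
    · have hpar : (pos + 1 - 1 - tmslBack text.toList pos (pos + 1 - 1)) % 2 = 0 := by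
        have hstop : tmslBack text.toList pos (pos + 1 - 1) = pos + 1 - 1 := by
          apply tmslBack_stop
          rintro ⟨hlt2, -⟩
          omega
        rw [hstop]; omega
      have h := tmsl_main text pos hpre (text.toList.length + pos.natAbs + 2) (pos + 1)
        (text.toList.length + 1) (by omega) (by omega) (by omega) (by omega) hpar
      simp [hge', not_lt.mpr hpre, hget, hq]
      simpa using h
    · simp [hge', not_lt.mpr hpre, hget, hq]
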